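-- pv_equiv track=rewrite | github.com/Semiys/AISD_Labs | Lab7.py | generate_menus_alg
-- ===== SOURCE A (Python) =====
-- def generate_menus_alg(fruits, N):
--     if N == 0:
--         return [[]]
--     all_combinations = []
--     for m in fruits:
--         for rest_of_menu in generate_menus_alg(fruits, N - 1):
--             all_combinations.append([m] + rest_of_menu)
--     return all_combinations
-- ===== SOURCE B (Python) =====
-- def generate_menus_alg(fruits, N):
--     result = [[]]
--     for _ in range(N):
--         result = [[m] + rest for m in fruits for rest in result]
--     return result
-- ===== Notes on version B (the rewrite author's own statement) =====
-- stated objective: simpler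
-- what changed: Replaces A's recursion (which re-enters the recursive call once per fruit at every level) with a single iterative loop that extends the combination list once per level via one comprehension.
-- outside the precondition, e.g. on generate_menus_alg([], -1): A returns [], B returns [[]]
import Mathlib
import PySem

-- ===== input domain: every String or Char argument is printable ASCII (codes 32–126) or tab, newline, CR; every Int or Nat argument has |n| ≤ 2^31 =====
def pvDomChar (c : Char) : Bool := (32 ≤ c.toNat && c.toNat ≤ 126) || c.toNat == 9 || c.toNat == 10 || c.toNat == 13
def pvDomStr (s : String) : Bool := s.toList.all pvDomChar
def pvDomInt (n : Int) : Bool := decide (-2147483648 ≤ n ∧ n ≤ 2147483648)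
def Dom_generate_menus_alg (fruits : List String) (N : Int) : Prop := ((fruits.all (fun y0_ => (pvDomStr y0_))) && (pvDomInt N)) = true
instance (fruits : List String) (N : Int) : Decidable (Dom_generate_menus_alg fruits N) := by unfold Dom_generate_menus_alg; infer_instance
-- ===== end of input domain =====

-- B replaces A's recursion (which recomputes the (N-1)-level list once per fruit) with one
-- simpler iterative pass extending the list once per level; equivalence proved on 0 ≤ N.

-- ===== PORT A =====
-- The 'N ≤ 0' guard only makes the recursion total; Python tests 'N == 0' and recurses
-- forever (RecursionError) on N < 0, which Pre_ excludes.
def generate_menus_alg (fruits : List String) (N : Int) : List (List String) :=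
  if N ≤ 0 then [[]]
  else
    fruits.foldl (fun all_combinations m =>
      (generate_menus_alg fruits (N - 1)).foldl
        (fun acc rest_of_menu => acc ++ [m :: rest_of_menu]) all_combinations) []
termination_by N.toNat
decreasing_by omega

-- ===== PORT B =====
-- the comprehension [[m] + rest for m in fruits for rest in result]
def pvLevelStep (fruits : List String) (result : List (List String)) : List (List String) :=
  fruits.flatMap (fun m => result.map (fun rest => m :: rest))

def generate_menus_alg_alt (fruits : List String) (N : Int) : List (List String) :=
  (PySem.List.pyRange 0 N 1).foldl (fun result _ => pvLevelStep fruits result) [[]]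

-- ===== PRECONDITION & SPEC =====
-- Pre_ excludes N < 0: there Python A recurses without bound (RecursionError) for nonempty fruits,
-- and for empty fruits returns [] only because the empty loop cuts the recursion off — an accident
-- of A's implementation on a meaningless negative count; B returns [[]] there.
def Pre_generate_menus_alg (fruits : List String) (N : Int) : Prop := 0 ≤ N
instance (fruits : List String) (N : Int) : Decidable (Pre_generate_menus_alg fruits N) := by
  unfold Pre_generate_menus_alg; infer_instance

def pvWitness_generate_menus_alg : List String × Int := (["apple", "banana"], 2)

def Spec_generate_menus_alg (fruits : List String) (N : Int) (out : List (List String)) : Prop := out = generate_menus_alg_alt fruits N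
instance (fruits : List String) (N : Int) (out : List (List String)) : Decidable (Spec_generate_menus_alg fruits N out) := by unfold Spec_generate_menus_alg; infer_instance

-- ===== CLAIM (what is proved, stated in full; the proofs are below) =====
def Claim_equal_generate_menus_alg : Prop := ∀ (fruits : List String) (N : Int), Dom_generate_menus_alg fruits N → Pre_generate_menus_alg fruits N → Spec_generate_menus_alg fruits N (generate_menus_alg fruits N)


-- ===== LEMMAS AND PROOFS =====

-- A's inner loop appends (m :: ·) of each sub-combination to the accumulator
lemma foldl_append_singleton (m : String) :
    ∀ (l : List (List String)) (acc : List (List String)),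
      l.foldl (fun acc r => acc ++ [m :: r]) acc = acc ++ l.map (fun r => m :: r) := by
  intro l
  induction l with
  | nil => intro acc; simp
  | cons x xs ih => intro acc; simp [List.foldl_cons, ih, List.append_assoc]

-- A's outer loop is one pvLevelStep on the recursive result
lemma foldl_outer (fruits : List String) (sub : List (List String)) :
    ∀ acc : List (List String),
      fruits.foldl (fun acc m => sub.foldl (fun a r => a ++ [m :: r]) acc) acc
        = acc ++ pvLevelStep fruits sub := by
  induction fruits with
  | nil => intro acc; simp [pvLevelStep]
  | cons f fs ih =>
      intro acc
      rw [List.foldl_cons, foldl_append_singleton, ih]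
      simp [pvLevelStep, List.append_assoc]

lemma A_step (fruits : List String) (N : Int) (h : 0 < N) :
    generate_menus_alg fruits N = pvLevelStep fruits (generate_menus_alg fruits (N - 1)) := by
  rw [generate_menus_alg]
  rw [if_neg (by omega)]
  simpa using foldl_outer fruits (generate_menus_alg fruits (N - 1)) []

lemma B_step (fruits : List String) (N : Int) (h : 0 < N) :
    generate_menus_alg_alt fruits N = pvLevelStep fruits (generate_menus_alg_alt fruits (N - 1)) := by
  unfold generate_menus_alg_alt
  have : PySem.List.pyRange 0 N 1 = PySem.List.pyRange 0 (N - 1) 1 ++ [N - 1] := by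
    have := PySem.List.pyRange_one_succ_right (a := 0) (b := N - 1) (by omega)
    simpa using this
  rw [this, List.foldl_append]
  simp

lemma agree : ∀ (n : Nat) (fruits : List String) (N : Int), 0 ≤ N → N.toNat = n →
    generate_menus_alg fruits N = generate_menus_alg_alt fruits N := by
  intro n
  induction n with
  | zero =>
      intro fruits N h0 hn
      have hN : N = 0 := by omega
      subst hN
      rw [generate_menus_alg, if_pos (by omega)]
      simp [generate_menus_alg_alt, PySem.List.pyRange_one_eq_nil (by omega : (0:Int) ≤ 0)]
  | succ k ih =>
      intro fruits N h0 hn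
      have hpos : 0 < N := by omega
      rw [A_step fruits N hpos, B_step fruits N hpos,
        ih fruits (N - 1) (by omega) (by omega)]

-- ===== VERDICT (by name: the statement is the Claim_ definition above) =====
theorem generate_menus_alg_spec : Claim_equal_generate_menus_alg := by
  intro fruits N _ hpre
  unfold Spec_generate_menus_alg
  exact agree N.toNat fruits N hpre rfl
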